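-- pv_equiv track=rewrite | github.com/KDE/pology | misc/diff.py | _assemble_ediff
-- ===== SOURCE A (Python) =====
-- _new_tag = "+"
--
-- _new_vtag = "+"
--
-- _new_opnc = "{"
--
-- _new_clsc = "}"
--
-- _old_tag = "-"
--
-- _old_vtag = "-"
--
-- _old_opnc = "{"
--
-- _old_clsc = "}"
--
-- _tagext_none = "~"
--
-- _tagext_none_len = len(_tagext_none)
--
-- def _assemble_ediff (dlist, dwraps):
--
--     if not dlist:
--         return None
--
--     old_opn, old_cls, new_opn, new_cls = dwraps
--     dtext = []
--     other_none = False
--     for segtag, segtext in dlist: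
--         wext = ""
--         if segtag.endswith(_tagext_none):
--             # Can happen only if there is a single difference segment.
--             segtag = segtag[:-_tagext_none_len]
--             other_none = True
--         segtext = _escape_ewraps(segtext)
--         if segtag == _new_tag:
--             dtext.append(new_opn + segtext + new_cls + wext)
--         elif segtag == _old_tag:
--             dtext.append(old_opn + segtext + old_cls + wext)
--         else:
--             dtext.append(segtext)
--             haseqseg = True
--     dtext = u"".join(dtext)
--
--     if other_none:
--         # Indicate the other string was none.
--         dtext += _tagext_none
--     elif dtext.endswith(_tagext_none):
--         # Escape any trailing other-none markers.
--         dtext += _tagext_none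
--
--     return dtext
--
-- def _escape_ewraps (text):
--
--     return _escunesc_ewraps(text, False)
--
-- _ediff_esc = _tagext_none
--
-- _ediff_esc_len = len(_ediff_esc)
--
-- def _escunesc_ewraps (text, unescape):
--
--     for wstart, wend in (
--         (_old_opnc, _old_vtag),
--         (_old_vtag, _old_clsc),
--         (_new_opnc, _new_vtag),
--         (_new_vtag, _new_clsc),
--     ):
--         segs = []
--         p = 0
--         tlen = len(text)
--         lwstart = len(wstart)
--         lwend = len(wend)
--         while True:
--             pp = p
--             p = text.find(wstart, p)
--             if p < 0:
--                 segs.append(text[pp:])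
--                 break
--             segs.append(text[pp:p])
--             pp = p
--             p += lwstart
--             nesc = 0
--             while p < tlen and text[p:p + _ediff_esc_len] == _ediff_esc:
--                 p += _ediff_esc_len
--                 nesc += 1
--             if p == tlen or text[p:p + lwend] != wend or (unescape and nesc < 1):
--                 segs.append(text[pp:p])
--             else:
--                 if not unescape:
--                     segs.append(text[pp:p] + _ediff_esc + wend)
--                 else:
--                     segs.append(text[pp:p - _ediff_esc_len] + wend)
--                 p += lwend
--         text = u"".join(segs)
--
--     return text
-- ===== SOURCE B (Python) =====
-- import re
--
-- _new_tag = "+"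
-- _old_tag = "-"
-- _tagext_none = "~"
--
-- # Escaping via one regex substitution per wrap pair: insert one extra "~"
-- # before wend in every occurrence of wstart + "~"* + wend.
-- _ewrap_res = [
--     re.compile(re.escape(wstart) + "(~*)" + re.escape(wend))
--     for wstart, wend in (("{", "-"), ("-", "}"), ("{", "+"), ("+", "}"))
-- ]
--
-- def _escape_ewraps_re(text):
--     for wstart_wend_re in _ewrap_res:
--         text = wstart_wend_re.sub(lambda m: m.group(0)[:-1] + "~" + m.group(0)[-1], text)
--     return text
--
-- def _assemble_ediff(dlist, dwraps):
--     if not dlist: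
--         return None
--     old_opn, old_cls, new_opn, new_cls = dwraps
--     other_none = any(segtag.endswith(_tagext_none) for segtag, _ in dlist)
--     parts = []
--     for segtag, segtext in dlist:
--         tag = segtag[:-1] if segtag.endswith(_tagext_none) else segtag
--         txt = _escape_ewraps_re(segtext)
--         if tag == _new_tag:
--             parts.append(new_opn + txt + new_cls)
--         elif tag == _old_tag:
--             parts.append(old_opn + txt + old_cls)
--         else:
--             parts.append(txt)
--     dtext = u"".join(parts)
--     if other_none or dtext.endswith(_tagext_none):
--         dtext += _tagext_none
--     return dtext
-- ===== Notes on version B (the rewrite author's own statement) =====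
-- stated objective: idiomatic
-- what changed: The escaping is done by one regex-style substitution per wrap pair (pattern wstart(~*)wend, inserting one '~' before wend) instead of A's hand-rolled find/position scan with manual segment collection, and the assembly loop's threaded other_none flag and if/elif trailing-marker logic are replaced by any() + a map/join and a single disjunction.
import Mathlib
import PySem

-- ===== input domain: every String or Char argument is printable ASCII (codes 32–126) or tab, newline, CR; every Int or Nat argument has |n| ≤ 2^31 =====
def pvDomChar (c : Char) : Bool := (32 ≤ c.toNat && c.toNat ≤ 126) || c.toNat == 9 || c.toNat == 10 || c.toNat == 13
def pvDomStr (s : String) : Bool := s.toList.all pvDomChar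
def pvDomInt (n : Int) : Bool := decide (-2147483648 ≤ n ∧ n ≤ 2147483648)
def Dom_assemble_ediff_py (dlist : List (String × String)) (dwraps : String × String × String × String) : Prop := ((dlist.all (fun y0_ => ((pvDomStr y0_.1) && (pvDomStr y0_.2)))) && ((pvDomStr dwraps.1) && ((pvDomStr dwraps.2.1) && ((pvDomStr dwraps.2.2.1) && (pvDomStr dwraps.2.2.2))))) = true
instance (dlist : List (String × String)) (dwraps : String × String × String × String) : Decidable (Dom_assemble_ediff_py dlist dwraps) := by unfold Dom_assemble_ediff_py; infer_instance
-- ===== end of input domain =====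

-- B replaces A's hand-rolled find/scan escaping loop by one regex-style substitution pass per
-- wrap pair and A's flag-threading foldl by any + map + join (objective: idiomatic; same cost).

-- ===== PORT A =====
-- The module wrap constants are the 1-char strings "{" "-" "+" "}"; they are ported as Char
-- (exact, since each has length 1 and the escape marker "~" also has length 1).
-- _escunesc_ewraps's inner `while True` with position p: ported as recursion on the suffix of
-- the text from p on; `text.find(wstart, p)` for the 1-char needle is takeWhile/dropWhile.
def escunescA (unescape : Bool) (ws we : Char) (text : List Char) : List Char :=
  match hr : text.dropWhile (fun c => !(c == ws)) with
  | [] => text                      -- find returned -1: append text[pp:], break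
  | c :: t =>
      text.takeWhile (fun c => !(c == ws)) ++ c ::
        (let tild := t.takeWhile (fun c => c == '~')
         let rest' := t.dropWhile (fun c => c == '~')
         if rest'.head? = some we ∧ (unescape = false ∨ 1 ≤ tild.length) then
           if unescape then tild.dropLast ++ we :: escunescA unescape ws we rest'.tail
           else tild ++ '~' :: we :: escunescA unescape ws we rest'.tail
         else tild ++ escunescA unescape ws we rest')
  termination_by text.length
  decreasing_by
  · have h1 : (c :: t).length ≤ text.length := by
      have := (List.dropWhile_sublist (l := text) (p := fun c => !(c == ws))).length_le
      simpa [hr] using this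
    have h2 : (t.dropWhile (fun c => c == '~')).length ≤ t.length :=
      (List.dropWhile_sublist _).length_le
    have h3 : (t.dropWhile (fun c => c == '~')).tail.length ≤ (t.dropWhile (fun c => c == '~')).length :=
      (List.tail_sublist _).length_le
    simp at h1; omega
  · have h1 : (c :: t).length ≤ text.length := by
      have := (List.dropWhile_sublist (l := text) (p := fun c => !(c == ws))).length_le
      simpa [hr] using this
    have h2 : (t.dropWhile (fun c => c == '~')).length ≤ t.length :=
      (List.dropWhile_sublist _).length_le
    have h3 : (t.dropWhile (fun c => c == '~')).tail.length ≤ (t.dropWhile (fun c => c == '~')).length :=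
      (List.tail_sublist _).length_le
    simp at h1; omega
  · have h1 : (c :: t).length ≤ text.length := by
      have := (List.dropWhile_sublist (l := text) (p := fun c => !(c == ws))).length_le
      simpa [hr] using this
    have h2 : (t.dropWhile (fun c => c == '~')).length ≤ t.length :=
      (List.dropWhile_sublist _).length_le
    simp at h1; omega

-- the for-loop of _escunesc_ewraps over the four wrap pairs
def ewrapPairsA : List (Char × Char) := [('{', '-'), ('-', '}'), ('{', '+'), ('+', '}')]

def escunesc_ewrapsA (text : List Char) (unescape : Bool) : List Char :=
  ewrapPairsA.foldl (fun t p => escunescA unescape p.1 p.2 t) text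

def escape_ewrapsA (text : String) : String :=
  String.ofList (escunesc_ewrapsA text.toList false)

def assemble_ediff_py (dlist : List (String × String)) (dwraps : String × String × String × String) : Option String :=
  if dlist.isEmpty then none
  else
    let old_opn := dwraps.1
    let old_cls := dwraps.2.1
    let new_opn := dwraps.2.2.1
    let new_cls := dwraps.2.2.2
    let st := dlist.foldl (fun (st : List String × Bool) seg =>
      let wext := ""
      let tagflag : String × Bool :=
        if PySem.Str.endswith seg.1 "~" then (PySem.Str.slice seg.1 none (some (-1)), true)
        else (seg.1, st.2)
      let segtext := escape_ewrapsA seg.2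
      if tagflag.1 = "+" then (st.1 ++ [new_opn ++ segtext ++ new_cls ++ wext], tagflag.2)
      else if tagflag.1 = "-" then (st.1 ++ [old_opn ++ segtext ++ old_cls ++ wext], tagflag.2)
      else (st.1 ++ [segtext], tagflag.2)) ([], false)
    let dtext := PySem.Str.join "" st.1
    if st.2 then some (dtext ++ "~")
    else if PySem.Str.endswith dtext "~" then some (dtext ++ "~")
    else some dtext

-- ===== PORT B =====
-- Hand port of re.sub(re.escape(ws) + "(~*)" + re.escape(we), <keep, extra "~" before we>, text)
-- for 1-char ws/we with ws ≠ '~' ≠ we: exact, because re.sub scans left to right, at each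
-- position either matching ws ~* we (consuming it, emitting it with one extra '~') or emitting
-- the current character and moving on by one — which is precisely this recursion.
def reSubEsc (ws we : Char) : List Char → List Char
  | [] => []
  | c :: t =>
      if c = ws ∧ (t.dropWhile (fun c => c == '~')).head? = some we then
        c :: t.takeWhile (fun c => c == '~') ++ '~' :: we :: reSubEsc ws we (t.dropWhile (fun c => c == '~')).tail
      else c :: reSubEsc ws we t
  termination_by t => t.length
  decreasing_by
  · have h2 : (t.dropWhile (fun c => c == '~')).length ≤ t.length :=
      (List.dropWhile_sublist _).length_le
    simp; omega
  · simp

def ewrapREsB : List (Char × Char) := [('{', '-'), ('-', '}'), ('{', '+'), ('+', '}')]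

def escape_ewraps_reB (text : String) : String :=
  String.ofList (ewrapREsB.foldl (fun t p => reSubEsc p.1 p.2 t) text.toList)

def assemble_ediff_py_alt (dlist : List (String × String)) (dwraps : String × String × String × String) : Option String :=
  if dlist.isEmpty then none
  else
    let old_opn := dwraps.1
    let old_cls := dwraps.2.1
    let new_opn := dwraps.2.2.1
    let new_cls := dwraps.2.2.2
    let other_none := dlist.any (fun seg => PySem.Str.endswith seg.1 "~")
    let parts := dlist.map (fun seg =>
      let tag := if PySem.Str.endswith seg.1 "~" then PySem.Str.slice seg.1 none (some (-1)) else seg.1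
      let txt := escape_ewraps_reB seg.2
      if tag = "+" then new_opn ++ txt ++ new_cls
      else if tag = "-" then old_opn ++ txt ++ old_cls
      else txt)
    let dtext := PySem.Str.join "" parts
    some (if other_none || PySem.Str.endswith dtext "~" then dtext ++ "~" else dtext)

-- ===== PRECONDITION & SPEC =====
def Spec_assemble_ediff_py (dlist : List (String × String)) (dwraps : String × String × String × String) (out : Option String) : Prop := out = assemble_ediff_py_alt dlist dwraps
instance (dlist : List (String × String)) (dwraps : String × String × String × String) (out : Option String) : Decidable (Spec_assemble_ediff_py dlist dwraps out) := by unfold Spec_assemble_ediff_py; infer_instance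

-- ===== CLAIM (what is proved, stated in full; the proofs are below) =====
def Claim_equal_assemble_ediff_py : Prop := ∀ (dlist : List (String × String)) (dwraps : String × String × String × String), Dom_assemble_ediff_py dlist dwraps → Spec_assemble_ediff_py dlist dwraps (assemble_ediff_py dlist dwraps)

-- ===== LEMMAS AND PROOFS =====

-- reSubEsc passes over characters that are not ws
theorem reSubEsc_append_of_no_ws (ws we : Char) (pre rest : List Char)
    (h : ∀ c ∈ pre, c ≠ ws) :
    reSubEsc ws we (pre ++ rest) = pre ++ reSubEsc ws we rest := by
  induction pre with
  | nil => rfl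
  | cons c p ih =>
      have hc : c ≠ ws := h c (by simp)
      rw [List.cons_append, reSubEsc, if_neg (by simp [hc]), ih (fun x hx => h x (by simp [hx]))]
      simp

-- the per-pair escape passes agree (escape direction only; ws is never the escape char '~')
-- one-step unfolding of escunescA (escape direction) when ws occurs
theorem escunescA_cons (ws we c : Char) (t text : List Char)
    (hr : text.dropWhile (fun c => !(c == ws)) = c :: t) :
    escunescA false ws we text =
      text.takeWhile (fun c => !(c == ws)) ++ c ::
        (if (t.dropWhile (fun c => c == '~')).head? = some we then
          t.takeWhile (fun c => c == '~') ++ '~' :: we ::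
            escunescA false ws we (t.dropWhile (fun c => c == '~')).tail
        else t.takeWhile (fun c => c == '~') ++
            escunescA false ws we (t.dropWhile (fun c => c == '~'))) := by
  rw [escunescA, hr]
  by_cases h : (t.dropWhile (fun c => c == '~')).head? = some we <;> simp [h]

theorem reSubEsc_eq_escunescA (ws we : Char) (hws : ws ≠ '~') :
    ∀ text, reSubEsc ws we text = escunescA false ws we text := by
  intro text
  induction text using escunescA.induct (ws := ws) with
  | case1 text hr =>
      rw [escunescA, hr]
      have hall : ∀ c ∈ text, c ≠ ws := by
        have := List.dropWhile_eq_nil_iff.mp hr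
        intro c hc
        simpa using this c hc
      have h0 : reSubEsc ws we [] = [] := by rw [reSubEsc]
      simpa [h0] using reSubEsc_append_of_no_ws ws we text [] hall
  | case2 text c t hr ih1 ih2 =>
      have ih1' : reSubEsc ws we (t.dropWhile (fun c => c == '~')).tail
          = escunescA false ws we (t.dropWhile (fun c => c == '~')).tail := ih1
      have ih2' : reSubEsc ws we (t.dropWhile (fun c => c == '~'))
          = escunescA false ws we (t.dropWhile (fun c => c == '~')) := ih2
      have hpre : ∀ x ∈ text.takeWhile (fun c => !(c == ws)), x ≠ ws := by
        intro x hx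
        simpa using List.mem_takeWhile_imp hx
      have hsplit : text = text.takeWhile (fun c => !(c == ws)) ++ c :: t := by
        conv_lhs => rw [← List.takeWhile_append_dropWhile (p := fun c => !(c == ws)) (l := text), hr]
      have hc : c = ws := by
        have := List.head?_dropWhile_not (p := fun c => !(c == ws)) (l := text)
        rw [hr] at this
        simpa using this
      rw [escunescA_cons ws we c t text hr]
      by_cases hcond : (t.dropWhile (fun c => c == '~')).head? = some we
      · -- a genuine occurrence: both sides insert one '~' and continue after we
        rw [if_pos hcond]
        conv_lhs => rw [hsplit]
        rw [reSubEsc_append_of_no_ws ws we _ _ hpre, reSubEsc, if_pos ⟨hc, hcond⟩, ih1']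
        simp
      · -- no occurrence here: both sides pass over ws and the escape run unchanged
        rw [if_neg hcond]
        have htild : ∀ x ∈ t.takeWhile (fun c => c == '~'), x ≠ ws := by
          intro x hx
          have hx' : x = '~' := by simpa using List.mem_takeWhile_imp hx
          rw [hx']
          exact fun h => hws h.symm
        conv_lhs => rw [hsplit]
        rw [reSubEsc_append_of_no_ws ws we _ _ hpre, reSubEsc, if_neg (by simp [hcond])]
        conv_lhs =>
          rw [show t = t.takeWhile (fun c => c == '~') ++ t.dropWhile (fun c => c == '~') from
                (List.takeWhile_append_dropWhile ..).symm,
              reSubEsc_append_of_no_ws ws we _ _ htild]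
        rw [ih2']

-- the whole escape pipelines agree
theorem escape_eq (s : String) : escape_ewraps_reB s = escape_ewrapsA s := by
  unfold escape_ewraps_reB escape_ewrapsA escunesc_ewrapsA ewrapREsB ewrapPairsA
  simp only [List.foldl_cons, List.foldl_nil]
  rw [reSubEsc_eq_escunescA _ _ (by decide), reSubEsc_eq_escunescA _ _ (by decide),
      reSubEsc_eq_escunescA _ _ (by decide), reSubEsc_eq_escunescA _ _ (by decide)]

-- A's flag-threading foldl is B's any + map
theorem foldA_eq (dwraps : String × String × String × String) (dlist : List (String × String)) :
    ∀ (acc : List String) (b : Bool),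
      dlist.foldl (fun (st : List String × Bool) seg =>
        let wext := ""
        let tagflag : String × Bool :=
          if PySem.Str.endswith seg.1 "~" then (PySem.Str.slice seg.1 none (some (-1)), true)
          else (seg.1, st.2)
        let segtext := escape_ewrapsA seg.2
        if tagflag.1 = "+" then (st.1 ++ [dwraps.2.2.1 ++ segtext ++ dwraps.2.2.2 ++ wext], tagflag.2)
        else if tagflag.1 = "-" then (st.1 ++ [dwraps.1 ++ segtext ++ dwraps.2.1 ++ wext], tagflag.2)
        else (st.1 ++ [segtext], tagflag.2)) (acc, b)
      = (acc ++ dlist.map (fun seg =>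
          let tag := if PySem.Str.endswith seg.1 "~" then PySem.Str.slice seg.1 none (some (-1)) else seg.1
          let txt := escape_ewraps_reB seg.2
          if tag = "+" then dwraps.2.2.1 ++ txt ++ dwraps.2.2.2
          else if tag = "-" then dwraps.1 ++ txt ++ dwraps.2.1
          else txt),
         b || dlist.any (fun seg => PySem.Str.endswith seg.1 "~")) := by
  induction dlist with
  | nil => intro acc b; simp
  | cons seg rest ih =>
      intro acc b
      rw [List.foldl_cons, List.map_cons, List.any_cons, ih]
      by_cases hend : PySem.Str.endswith seg.1 "~" = true <;>
        by_cases h1 : (if PySem.Str.endswith seg.1 "~" then PySem.Str.slice seg.1 none (some (-1)) else seg.1) = "+" <;>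
        by_cases h2 : (if PySem.Str.endswith seg.1 "~" then PySem.Str.slice seg.1 none (some (-1)) else seg.1) = "-" <;>
        simp_all [escape_eq, String.append_empty]

-- A's if/elif trailing-marker logic is B's single disjunction
theorem final_if (b : Bool) (s : String) :
    (if b = true then some (s ++ "~") else if PySem.Str.endswith s "~" = true then some (s ++ "~") else some s)
    = some (if (b || PySem.Str.endswith s "~") = true then s ++ "~" else s) := by
  cases b with
  | true => simp
  | false =>
      simp only [Bool.false_eq_true, if_false, Bool.false_or]
      split <;> rfl

-- ===== VERDICT (by name: the statement is the Claim_ definition above) =====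
theorem assemble_ediff_py_spec : Claim_equal_assemble_ediff_py := by
  intro dlist dwraps _
  unfold Spec_assemble_ediff_py assemble_ediff_py assemble_ediff_py_alt
  by_cases hnil : dlist.isEmpty
  · simp [hnil]
  · simp only [hnil, Bool.false_eq_true, if_false]
    rw [foldA_eq dwraps dlist [] false]
    simp only [List.nil_append, Bool.false_or]
    exact final_if _ _
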